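-- pv_equiv track=rewrite | github.com/manishagarg/Kaplanskys_Conjectures | actual_middle_link/equivalence.py | noFoldOriented
-- ===== SOURCE A (Python) =====
-- def noFoldOriented(equiv_class):
--     no_fold = True
--     f=[]
--     g=[]
--     for pair in equiv_class:
--         f.append(pair[0])
--         g.append(pair[1])
--     if((len(set(f)) < len(f)) or (len(set(g)) < len(g))): no_fold = False
--     return no_fold
-- ===== SOURCE B (Python) =====
-- def noFoldOriented(equiv_class):
--     seen_first = set()
--     seen_second = set()
--     for pair in equiv_class:
--         if pair[0] in seen_first or pair[1] in seen_second:
--             return False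
--         seen_first.add(pair[0])
--         seen_second.add(pair[1])
--     return True
-- ===== Notes on version B (the rewrite author's own statement) =====
-- stated objective: simpler
-- what changed: Replaces the build-two-lists-then-compare-set-sizes pass with a single incremental scan keeping two seen-sets and returning False on the first repeated first- or second-component.
import Mathlib
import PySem

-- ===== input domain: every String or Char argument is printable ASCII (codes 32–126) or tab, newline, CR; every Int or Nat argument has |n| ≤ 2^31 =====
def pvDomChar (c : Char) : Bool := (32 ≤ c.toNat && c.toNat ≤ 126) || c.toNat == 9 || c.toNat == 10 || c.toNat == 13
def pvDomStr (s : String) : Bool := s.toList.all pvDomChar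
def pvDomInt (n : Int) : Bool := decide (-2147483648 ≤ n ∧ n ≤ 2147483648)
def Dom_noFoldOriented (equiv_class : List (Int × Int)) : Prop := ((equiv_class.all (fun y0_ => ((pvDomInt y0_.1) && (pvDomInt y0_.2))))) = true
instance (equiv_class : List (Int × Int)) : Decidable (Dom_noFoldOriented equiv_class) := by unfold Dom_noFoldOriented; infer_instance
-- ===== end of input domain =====

-- B replaces A's build-two-lists-then-compare-set-sizes pass with a single scan keeping
-- two seen-sets and an early exit on the first repeated component (objective: simpler).

-- ===== PORT A =====
-- literal transliteration: build f and g by appending, then compare len(set(·)) with len(·)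
def noFoldOriented (equiv_class : List (Int × Int)) : Bool :=
  let no_fold := true
  let fg := equiv_class.foldl
    (fun (s : List Int × List Int) pair => (s.1 ++ [pair.1], s.2 ++ [pair.2])) ([], [])
  let f := fg.1
  let g := fg.2
  if (PySem.Set.len (PySem.Set.ofList f) < PySem.List.len f) ||
     (PySem.Set.len (PySem.Set.ofList g) < PySem.List.len g) then false
  else no_fold

-- ===== PORT B =====
-- single pass with two seen-sets and early return (Source B's loop as structural recursion)
def noFoldAux (seenF seenG : PySem.Set Int) : List (Int × Int) → Bool
  | [] => true
  | pair :: rest =>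
    if PySem.Set.contains seenF pair.1 || PySem.Set.contains seenG pair.2 then false
    else noFoldAux (PySem.Set.add seenF pair.1) (PySem.Set.add seenG pair.2) rest

def noFoldOriented_alt (equiv_class : List (Int × Int)) : Bool :=
  noFoldAux PySem.Set.empty PySem.Set.empty equiv_class

-- ===== PRECONDITION & SPEC =====
def Spec_noFoldOriented (equiv_class : List (Int × Int)) (out : Bool) : Prop := out = noFoldOriented_alt equiv_class
instance (equiv_class : List (Int × Int)) (out : Bool) : Decidable (Spec_noFoldOriented equiv_class out) := by unfold Spec_noFoldOriented; infer_instance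

-- ===== CLAIM (what is proved, stated in full; the proofs are below) =====
def Claim_equal_noFoldOriented : Prop := ∀ (equiv_class : List (Int × Int)), Dom_noFoldOriented equiv_class → Spec_noFoldOriented equiv_class (noFoldOriented equiv_class)

-- ===== LEMMAS AND PROOFS =====

-- A's loop builds exactly (map fst, map snd)
theorem pvBuild (l : List (Int × Int)) (a b : List Int) :
    l.foldl (fun (s : List Int × List Int) pair => (s.1 ++ [pair.1], s.2 ++ [pair.2])) (a, b)
      = (a ++ l.map Prod.fst, b ++ l.map Prod.snd) := by
  induction l generalizing a b with
  | nil => simp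
  | cons p t ih => simp [List.foldl_cons, ih]

-- len(set(l)) < len(l) says exactly that l has a duplicate
theorem pvLenOfList (l : List Int) :
    (PySem.Set.ofList l).length < l.length ↔ ¬ l.Nodup := by
  induction l using List.reverseRecOn with
  | nil => simp [PySem.Set.ofList]
  | append_singleton xs x ih =>
    have hofl : PySem.Set.ofList (xs ++ [x]) = PySem.Set.add (PySem.Set.ofList xs) x := by
      simp [PySem.Set.ofList, List.foldl_append]
    have hle : (PySem.Set.ofList xs).length ≤ xs.length := PySem.Set.length_ofList_le xs
    by_cases hx : x ∈ xs
    · have hx' : x ∈ PySem.Set.ofList xs := (PySem.Set.mem_ofList xs x).2 hx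
      have hadd : PySem.Set.add (PySem.Set.ofList xs) x = PySem.Set.ofList xs := by
        simp [PySem.Set.add, hx']
      have hnot : ¬ (xs ++ [x]).Nodup := by
        simp [List.nodup_append]
        exact fun _ => hx
      rw [hofl, hadd]
      simp only [List.length_append, List.length_singleton]
      constructor
      · intro _; exact hnot
      · intro _; omega
    · have hx' : x ∉ PySem.Set.ofList xs := fun h => hx ((PySem.Set.mem_ofList xs x).1 h)
      have hadd : PySem.Set.add (PySem.Set.ofList xs) x = PySem.Set.ofList xs ++ [x] := by
        simp [PySem.Set.add, hx']
      have hnd : (xs ++ [x]).Nodup ↔ xs.Nodup := by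
        simp [List.nodup_append]
        exact fun _ a ha hax => hx (hax ▸ ha)
      rw [hofl, hadd, hnd]
      simp only [List.length_append, List.length_singleton]
      constructor
      · intro hlt; exact ih.1 (by omega)
      · intro h; have := ih.2 h; omega

-- B's loop, generalized over the two seen-sets
theorem pvAuxEq (l : List (Int × Int)) (s t : PySem.Set Int)
    (hs : s.Nodup) (ht : t.Nodup) :
    noFoldAux s t l = decide ((s ++ l.map Prod.fst).Nodup ∧ (t ++ l.map Prod.snd).Nodup) := by
  induction l generalizing s t with
  | nil => simp [noFoldAux, hs, ht]
  | cons p rest ih =>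
    simp only [noFoldAux, List.map_cons]
    by_cases h1 : p.1 ∈ s
    · rw [show PySem.Set.contains s p.1 = true from (PySem.Set.contains_iff s p.1).2 h1]
      simp only [Bool.true_or, if_true]
      symm
      simp only [decide_eq_false_iff_not]
      rintro ⟨hf, -⟩
      revert hf
      simp [List.nodup_append]
      exact fun _ _ _ => ⟨p.1, h1, fun h => absurd rfl h⟩
    · have hc1 : PySem.Set.contains s p.1 = false := by simp [h1]
      by_cases h2 : p.2 ∈ t
      · rw [hc1, show PySem.Set.contains t p.2 = true from (PySem.Set.contains_iff t p.2).2 h2]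
        simp only [Bool.false_or, if_true]
        symm
        simp only [decide_eq_false_iff_not]
        rintro ⟨-, hg⟩
        revert hg
        simp [List.nodup_append]
        exact fun _ _ _ => ⟨p.2, h2, fun h => absurd rfl h⟩
      · have hc2 : PySem.Set.contains t p.2 = false := by simp [h2]
        have ha1 : PySem.Set.add s p.1 = s ++ [p.1] := by simp [PySem.Set.add, h1]
        have ha2 : PySem.Set.add t p.2 = t ++ [p.2] := by simp [PySem.Set.add, h2]
        rw [hc1, hc2]
        simp only [Bool.or_self, Bool.false_eq_true, if_false]
        have hs' : (s ++ [p.1]).Nodup := by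
          simp [List.nodup_append, hs]
          exact fun a ha hax => h1 (hax ▸ ha)
        have ht' : (t ++ [p.2]).Nodup := by
          simp [List.nodup_append, ht]
          exact fun a ha hax => h2 (hax ▸ ha)
        rw [ha1, ha2, ih _ _ hs' ht']
        congr 1
        simp only [List.append_assoc, List.singleton_append]

-- ===== VERDICT (by name: the statement is the Claim_ definition above) =====
theorem noFoldOriented_spec : Claim_equal_noFoldOriented := by
  intro l _
  unfold Spec_noFoldOriented noFoldOriented noFoldOriented_alt
  rw [pvBuild,
    pvAuxEq l PySem.Set.empty PySem.Set.empty (by simp [PySem.Set.empty]) (by simp [PySem.Set.empty])]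
  simp only [PySem.Set.empty, PySem.Set.len, PySem.List.len_eq, List.nil_append, Nat.cast_lt]
  by_cases hf : (l.map Prod.fst).Nodup <;> by_cases hg : (l.map Prod.snd).Nodup
  · have h1 : ¬ (PySem.Set.ofList (l.map Prod.fst)).length < (l.map Prod.fst).length :=
      fun h => (pvLenOfList _).1 h hf
    have h2 : ¬ (PySem.Set.ofList (l.map Prod.snd)).length < (l.map Prod.snd).length :=
      fun h => (pvLenOfList _).1 h hg
    simp only [List.length_map] at h1 h2 ⊢
    simp [hf, hg, h1, h2]
  · have h2 := (pvLenOfList (l.map Prod.snd)).2 hg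
    simp only [List.length_map] at h2 ⊢
    simp [hg, h2]
  · have h1 := (pvLenOfList (l.map Prod.fst)).2 hf
    simp only [List.length_map] at h1 ⊢
    simp [hf, h1]
  · have h1 := (pvLenOfList (l.map Prod.fst)).2 hf
    simp only [List.length_map] at h1 ⊢
    simp [hf, h1]
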